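-- pv_equiv track=rewrite | github.com/MaSch882/advent_of_code | 2022/solutions/solution_01_12_2022.py | sum_blocks
-- ===== SOURCE A (Python) =====
-- def sum_blocks(list_of_strings: list[str]) -> list[int]:
--     result = []
--     subtotal = 0
--     for string in list_of_strings:
--         if string != '':
--             subtotal += int(string)
--         if string == '':
--             result.append(subtotal)
--             subtotal = 0
--     result.append(subtotal)
--     return result
-- ===== SOURCE B (Python) =====
-- def sum_blocks(list_of_strings: list[str]) -> list[int]:
--     groups = []
--     current = []
--     for s in list_of_strings:
--         if s == '':
--             groups.append(current)
--             current = []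
--         else:
--             current.append(s)
--     groups.append(current)
--     return [sum(int(x) for x in g) for g in groups]
-- ===== Notes on version B (the rewrite author's own statement) =====
-- stated objective: alternative
-- what changed: B splits the work into two passes: first group the non-empty strings into sublists at blank-line separators (with an unconditional trailing group), then map each group to the sum of its parsed ints, instead of A's single fused loop maintaining a running subtotal.
import Mathlib
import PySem

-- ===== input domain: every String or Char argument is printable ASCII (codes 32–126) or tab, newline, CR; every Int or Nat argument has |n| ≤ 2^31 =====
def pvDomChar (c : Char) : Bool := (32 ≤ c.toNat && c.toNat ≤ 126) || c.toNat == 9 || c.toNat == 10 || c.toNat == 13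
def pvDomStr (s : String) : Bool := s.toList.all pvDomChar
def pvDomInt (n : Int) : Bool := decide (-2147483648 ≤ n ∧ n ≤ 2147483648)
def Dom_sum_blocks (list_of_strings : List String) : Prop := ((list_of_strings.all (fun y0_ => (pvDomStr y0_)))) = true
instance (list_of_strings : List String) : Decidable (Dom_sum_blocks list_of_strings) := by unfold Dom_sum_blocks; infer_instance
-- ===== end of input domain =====

-- B replaces A's fused subtotal loop by two passes: group strings at '' separators, then map each group to its sum.
-- ===== PORT A =====
-- parse s as Python int(s); Pre_ excludes inputs where int() raises, so getD 0 is never taken on admitted inputs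
def pvParse (s : String) : Int := (PySem.Int.ofStr? s).getD 0

def sumBlocksLoopA (res : List Int) (sub : Int) : List String → List Int
  | [] => res ++ [sub]
  | s :: rest =>
    let sub := if s ≠ "" then sub + pvParse s else sub
    if s = "" then sumBlocksLoopA (res ++ [sub]) 0 rest
    else sumBlocksLoopA res sub rest

def sum_blocks (list_of_strings : List String) : List Int :=
  sumBlocksLoopA [] 0 list_of_strings

-- ===== PORT B =====
def sumBlocksGroups (gs : List (List String)) (cur : List String) : List String → List (List String)
  | [] => gs ++ [cur]
  | s :: rest =>
    if s = "" then sumBlocksGroups (gs ++ [cur]) [] rest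
    else sumBlocksGroups gs (cur ++ [s]) rest

def sumBlocksGroupSum (g : List String) : Int :=
  g.foldl (fun a x => a + pvParse x) 0

def sum_blocks_alt (list_of_strings : List String) : List Int :=
  (sumBlocksGroups [] [] list_of_strings).map sumBlocksGroupSum

-- ===== PRECONDITION & SPEC =====
-- Pre_ excludes exactly the inputs where int(string) raises ValueError in A (non-empty, non-int-parsable strings).
def Pre_sum_blocks (list_of_strings : List String) : Prop :=
  (list_of_strings.all (fun s => s == "" || (PySem.Int.ofStr? s).isSome)) = true
instance (list_of_strings : List String) : Decidable (Pre_sum_blocks list_of_strings) := by unfold Pre_sum_blocks; infer_instance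
def pvWitness_sum_blocks : List String := ["1", "2", "", "3"]

def Spec_sum_blocks (list_of_strings : List String) (out : List Int) : Prop := out = sum_blocks_alt list_of_strings
instance (list_of_strings : List String) (out : List Int) : Decidable (Spec_sum_blocks list_of_strings out) := by unfold Spec_sum_blocks; infer_instance

-- ===== CLAIM (what is proved, stated in full; the proofs are below) =====
def Claim_equal_sum_blocks : Prop := ∀ (list_of_strings : List String), Dom_sum_blocks list_of_strings → Pre_sum_blocks list_of_strings → Spec_sum_blocks list_of_strings (sum_blocks list_of_strings)

-- ===== LEMMAS AND PROOFS =====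
theorem sumBlocksGroupSum_append (g : List String) (s : String) :
    sumBlocksGroupSum (g ++ [s]) = sumBlocksGroupSum g + pvParse s := by
  simp [sumBlocksGroupSum]

theorem sumBlocks_loop_eq (l : List String) :
    ∀ (gs : List (List String)) (cur : List String) (sub : Int), sub = sumBlocksGroupSum cur →
    sumBlocksLoopA (gs.map sumBlocksGroupSum) sub l = (sumBlocksGroups gs cur l).map sumBlocksGroupSum := by
  induction l with
  | nil => intro gs cur sub h; simp [sumBlocksLoopA, sumBlocksGroups, h]
  | cons s rest ih =>
    intro gs cur sub h
    by_cases hs : s = ""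
    · subst hs
      simp only [sumBlocksLoopA, sumBlocksGroups, if_pos rfl, ne_eq, not_true_eq_false, if_false]
      have := ih (gs ++ [cur]) [] 0 (by simp [sumBlocksGroupSum])
      simpa [h] using this
    · simp only [sumBlocksLoopA, sumBlocksGroups, if_neg hs, ne_eq, hs, not_false_eq_true]
      have := ih gs (cur ++ [s]) (sub + pvParse s)
        (by rw [sumBlocksGroupSum_append, h])
      simpa using this

-- ===== VERDICT (by name: the statement is the Claim_ definition above) =====
theorem sum_blocks_spec : Claim_equal_sum_blocks := by
  intro l _ _
  unfold Spec_sum_blocks sum_blocks sum_blocks_alt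
  have := sumBlocks_loop_eq l [] [] 0 (by simp [sumBlocksGroupSum])
  simpa using this
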